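-- pv_equiv track=rewrite | github.com/bzadorozhnyi/gomory_solver | canonical_form.py | get_unit_vector_indeces
-- ===== SOURCE A (Python) =====
-- def is_unit_vector(vector):
--     return vector.count(1) == 1 and vector.count(0) == len(vector) - 1
--
-- def get_column(matrix, col):
--     return [row[col] for row in matrix]
--
-- def get_unit_vector_indeces(coefficients):
--     cols, indeces = len(coefficients[0]), []
--     for col in range(cols):
--         if is_unit_vector(get_column(coefficients, col)):
--             indeces.append(col)
--
--     unit_vector_indeces = []
--     for row in coefficients:
--         for index in indeces:
--             if row[index] == 1:
--                 unit_vector_indeces.append(index)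
--
--     return unit_vector_indeces
-- ===== SOURCE B (Python) =====
-- def get_unit_vector_indeces(coefficients):
--     buckets = [[] for _ in coefficients]
--     for col in range(len(coefficients[0])):
--         column = [row[col] for row in coefficients]
--         if column.count(1) == 1 and column.count(0) == len(column) - 1:
--             buckets[column.index(1)].append(col)
--     result = []
--     for bucket in buckets:
--         result += bucket
--     return result
-- ===== Notes on version B (the rewrite author's own statement) =====
-- stated objective: alternative
-- what changed: B drops A's second nested rows-by-unit-indices scan: during the single pass over columns it buckets each unit column under the row holding its 1, then concatenates the buckets in row order.
-- outside the precondition, e.g. on get_unit_vector_indeces([]): A raises IndexError, B raises IndexError; on get_unit_vector_indeces([[1, 0], [1]]): A raises IndexError, B raises IndexError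
import Mathlib
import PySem

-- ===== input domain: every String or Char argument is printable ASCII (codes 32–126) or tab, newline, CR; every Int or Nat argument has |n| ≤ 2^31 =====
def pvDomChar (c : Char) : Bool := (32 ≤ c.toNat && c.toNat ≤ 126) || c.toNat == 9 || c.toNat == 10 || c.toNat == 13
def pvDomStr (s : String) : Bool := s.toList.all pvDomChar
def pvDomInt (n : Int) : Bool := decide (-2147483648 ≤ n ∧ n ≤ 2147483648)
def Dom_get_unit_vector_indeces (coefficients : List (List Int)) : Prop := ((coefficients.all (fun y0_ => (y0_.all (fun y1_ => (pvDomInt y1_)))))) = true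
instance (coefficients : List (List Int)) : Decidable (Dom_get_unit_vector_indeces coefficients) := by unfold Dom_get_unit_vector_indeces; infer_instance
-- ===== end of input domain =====

-- B buckets each unit column under the row holding its 1 during the single column pass and
-- concatenates the buckets, replacing A's second nested rows×indices scan (objective: alternative).

-- ===== PORT A =====
def is_unit_vector (vector : List Int) : Bool :=
  PySem.List.count vector 1 == 1 && ((PySem.List.count vector 0 : Int) == (vector.length : Int) - 1)

def get_column (matrix : List (List Int)) (col : Int) : List Int :=
  matrix.map (fun row => PySem.List.pyGetD row col 0)   -- row[col]; exact under Pre_ (index in range)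

def get_unit_vector_indeces (coefficients : List (List Int)) : List Int :=
  let cols : Int := ((PySem.List.pyGetD coefficients 0 []).length : Int)   -- len(coefficients[0]); exact under Pre_
  let indeces : List Int := (PySem.List.pyRange 0 cols 1).foldl
    (fun acc col => if is_unit_vector (get_column coefficients col) then acc ++ [col] else acc) []
  coefficients.foldl
    (fun acc row => indeces.foldl
      (fun acc2 index => if PySem.List.pyGetD row index 0 == 1 then acc2 ++ [index] else acc2) acc)
    []

-- ===== PORT B =====
def get_unit_vector_indeces_alt (coefficients : List (List Int)) : List Int :=
  let buckets0 : List (List Int) := coefficients.map (fun _ => [])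
  let buckets : List (List Int) :=
    (PySem.List.pyRange 0 ((PySem.List.pyGetD coefficients 0 []).length : Int) 1).foldl
      (fun bs col =>
        let column : List Int := coefficients.map (fun row => PySem.List.pyGetD row col 0)
        if PySem.List.count column 1 == 1 && ((PySem.List.count column 0 : Int) == (column.length : Int) - 1) then
          match PySem.List.index? column 1 with   -- column.index(1); present under the unit guard
          | some i => bs.modify i (fun b => b ++ [col])
          | none => bs
        else bs)
      buckets0
  buckets.foldl (fun acc b => acc ++ b) []

-- ===== PRECONDITION & SPEC =====
-- Pre_ excludes exactly the inputs where the Python A raises IndexError: the empty matrix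
-- (coefficients[0]) and matrices with a row shorter than the first row (row[col] in get_column).
def Pre_get_unit_vector_indeces (coefficients : List (List Int)) : Prop :=
  coefficients ≠ [] ∧ ∀ row ∈ coefficients, (coefficients.headD []).length ≤ row.length
instance (coefficients : List (List Int)) : Decidable (Pre_get_unit_vector_indeces coefficients) := by unfold Pre_get_unit_vector_indeces; infer_instance

def pvWitness_get_unit_vector_indeces : List (List Int) := [[1, 0], [0, 1]]

def Spec_get_unit_vector_indeces (coefficients : List (List Int)) (out : List Int) : Prop := out = get_unit_vector_indeces_alt coefficients
instance (coefficients : List (List Int)) (out : List Int) : Decidable (Spec_get_unit_vector_indeces coefficients out) := by unfold Spec_get_unit_vector_indeces; infer_instance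

-- ===== CLAIM (what is proved, stated in full; the proofs are below) =====
def Claim_equal_get_unit_vector_indeces : Prop := ∀ (coefficients : List (List Int)), Dom_get_unit_vector_indeces coefficients → Pre_get_unit_vector_indeces coefficients → Spec_get_unit_vector_indeces coefficients (get_unit_vector_indeces coefficients)

-- ===== LEMMAS AND PROOFS =====

-- B's per-column bucket update (definitionally the body of B's fold).
def pvStep (coefficients : List (List Int)) (bs : List (List Int)) (col : Int) : List (List Int) :=
  let column : List Int := coefficients.map (fun row => PySem.List.pyGetD row col 0)
  if PySem.List.count column 1 == 1 && ((PySem.List.count column 0 : Int) == (column.length : Int) - 1) then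
    match PySem.List.index? column 1 with
    | some i => bs.modify i (fun b => b ++ [col])
    | none => bs
  else bs

lemma pvStep_eq (coefficients : List (List Int)) (bs : List (List Int)) (c : Int) :
    pvStep coefficients bs c =
      if is_unit_vector (get_column coefficients c) then
        match PySem.List.index? (get_column coefficients c) 1 with
        | some i => bs.modify i (fun b => b ++ [c])
        | none => bs
      else bs := rfl

-- in a list containing exactly one 1, position r holds a 1 iff r is the index .index(1) finds
lemma count_one_getElem_iff (l : List Int) (r : Nat) (h1 : List.count 1 l = 1) (hr : r < l.length) :
    l[r] = 1 ↔ PySem.List.index? l 1 = some r := by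
  constructor
  · intro hv
    have hmem : (1:Int) ∈ l := by exact hv ▸ List.getElem_mem hr
    have hs : (PySem.List.index? l 1).isSome := (PySem.List.index?_isSome_iff l 1).2 hmem
    obtain ⟨k, hk⟩ := Option.isSome_iff_exists.1 hs
    obtain ⟨hklt, hkv, hmin⟩ := PySem.List.getElem_of_index?_eq_some hk
    rcases lt_trichotomy r k with h | h | h
    · exact absurd hv (hmin r h)
    · rw [hk, h]
    · -- two ones at positions k < r would make the count at least 2
      exfalso
      have hsplit := List.take_append_drop r l
      have c1 : 1 ≤ List.count 1 (l.take r) := by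
        have : (1:Int) ∈ l.take r := by
          have : (l.take r)[k]'(by simp [hklt]; omega) = 1 := by
            rw [List.getElem_take]; exact hkv
          exact this ▸ List.getElem_mem _
        exact List.one_le_count_iff.2 this
      have c2 : 1 ≤ List.count 1 (l.drop r) := by
        have : (1:Int) ∈ l.drop r := by
          have : (l.drop r)[0]'(by simp; omega) = 1 := by
            rw [List.getElem_drop]; simpa using hv
          exact this ▸ List.getElem_mem _
        exact List.one_le_count_iff.2 this
      have : List.count 1 l = List.count 1 (l.take r) + List.count 1 (l.drop r) := by
        conv_lhs => rw [← hsplit]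
        exact List.count_append
      omega
  · intro hk
    obtain ⟨_, hkv, _⟩ := PySem.List.getElem_of_index?_eq_some hk
    exact hkv

-- the buckets after B's column pass, characterised row by row
lemma buckets_charac (coefficients : List (List Int)) (cs : List Int) :
    cs.foldl (pvStep coefficients) (coefficients.map (fun _ => [])) =
      (List.range coefficients.length).map (fun r =>
        (cs.filter (fun c => is_unit_vector (get_column coefficients c))).filter
          (fun c => PySem.List.index? (get_column coefficients c) 1 == some r)) := by
  induction cs using List.reverseRecOn with
  | nil => simp [List.map_const']
  | append_singleton cs c ih =>
    rw [List.foldl_append, List.foldl_cons, List.foldl_nil, ih, pvStep_eq]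
    by_cases hu : is_unit_vector (get_column coefficients c)
    · obtain ⟨hcnt, -⟩ : List.count 1 (get_column coefficients c) = 1 ∧
          (List.count 0 (get_column coefficients c) : Int) = ((get_column coefficients c).length : Int) - 1 := by
        simpa [is_unit_vector, PySem.List.count_eq] using hu
      have hmem : (1:Int) ∈ get_column coefficients c :=
        List.one_le_count_iff.1 (by omega)
      obtain ⟨k, hk⟩ := Option.isSome_iff_exists.1 ((PySem.List.index?_isSome_iff _ 1).2 hmem)
      obtain ⟨hklt, -, -⟩ := PySem.List.getElem_of_index?_eq_some hk
      have hkn : k < coefficients.length := by simpa [get_column] using hklt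
      have hk' : List.idxOf? 1 (get_column coefficients c) = some k := by
        simpa [PySem.List.index?_eq_idxOf?] using hk
      rw [if_pos hu, hk]
      apply List.ext_getElem
      · simp
      · intro j hj1 hj2
        rw [List.getElem_modify]
        have hjlen : j < coefficients.length := by simpa using hj1
        simp only [List.getElem_map, List.getElem_range, List.filter_append,
          List.filter_cons, List.filter_nil, hu, if_true]
        by_cases hkj : k = j
        · subst hkj
          simp [hk']
        · simp [hk', hkj]
    · rw [if_neg hu]
      simp [List.filter_append, hu]

-- flatMap over the rows as flatMap over the row indices
lemma flatMap_eq_range (l : List (List Int)) (g : List Int → List Int) :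
    l.flatMap g = (List.range l.length).flatMap (fun r => g (l.getD r [])) := by
  have h : (List.range l.length).map (fun r => l.getD r []) = l := by
    apply List.ext_getElem
    · simp
    · intro i h1 h2
      simp [List.getD_eq_getElem?_getD, List.getElem?_eq_getElem h2]
  conv_lhs => rw [← h]
  rw [List.flatMap_def, List.flatMap_def, List.map_map]
  rfl

theorem ports_agree (coefficients : List (List Int)) :
    get_unit_vector_indeces coefficients = get_unit_vector_indeces_alt coefficients := by
  set cols : Int := ((PySem.List.pyGetD coefficients 0 ([] : List Int)).length : Int) with hcols
  set U : List Int := (PySem.List.pyRange 0 cols 1).filter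
      (fun c => is_unit_vector (get_column coefficients c)) with hU
  set n := coefficients.length with hn
  -- A: both loops as filter / flatMap
  have hA : get_unit_vector_indeces coefficients =
      coefficients.flatMap (fun row => U.filter (fun c => PySem.List.pyGetD row c 0 == 1)) := by
    show coefficients.foldl _ [] = _
    rw [show ((PySem.List.pyRange 0 cols 1).foldl
        (fun acc col => if is_unit_vector (get_column coefficients col) then acc ++ [col] else acc) []) = U by
      rw [PySem.List.foldl_append_if_eq_filter]; simp [hU]]
    rw [PySem.List.foldl_congr_mem coefficients _
      (fun acc row => acc ++ U.filter (fun c => PySem.List.pyGetD row c 0 == 1)) []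
      (fun acc row _ => PySem.List.foldl_append_if_eq_filter _ U acc)]
    rw [PySem.List.foldl_append_eq_flatMap]
    simp
  -- B: buckets flattened
  have hB : get_unit_vector_indeces_alt coefficients =
      (List.range n).flatMap (fun r => U.filter
        (fun c => PySem.List.index? (get_column coefficients c) 1 == some r)) := by
    show ((PySem.List.pyRange 0 cols 1).foldl (pvStep coefficients)
        (coefficients.map (fun _ => []))).foldl (fun acc b => acc ++ b) [] = _
    rw [buckets_charac]
    rw [PySem.List.foldl_append_eq_flatMap (fun b => b)]
    simp [List.flatMap_def, List.map_map, hU]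
    rfl
  rw [hA, hB, flatMap_eq_range, ← hn]
  apply List.flatMap_congr
  intro r hr
  have hrn : r < n := List.mem_range.1 hr
  apply List.filter_congr
  intro c hc
  rw [hU, List.mem_filter] at hc
  obtain ⟨hcR, hcu⟩ := hc
  have hcnt : List.count 1 (get_column coefficients c) = 1 := by
    have h := hcu
    simp only [is_unit_vector, Bool.and_eq_true, beq_iff_eq, PySem.List.count_eq] at h
    exact h.1
  have hlen : (get_column coefficients c).length = n := by simp [get_column, hn]
  have hval : (get_column coefficients c)[r]'(by omega) = PySem.List.pyGetD (coefficients.getD r []) c 0 := by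
    simp [get_column, List.getD_eq_getElem?_getD, List.getElem?_eq_getElem (by omega : r < coefficients.length)]
  rw [Bool.eq_iff_iff]
  simp only [beq_iff_eq]
  rw [← hval]
  exact count_one_getElem_iff _ r hcnt (by omega)

-- ===== VERDICT (by name: the statement is the Claim_ definition above) =====
theorem get_unit_vector_indeces_spec : Claim_equal_get_unit_vector_indeces := by
  intro coefficients _ _
  unfold Spec_get_unit_vector_indeces
  exact ports_agree coefficients
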